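-- pv_equiv track=rewrite | github.com/Zoki92/algos | rectangle_mania.py | get_coords_table
-- ===== SOURCE A (Python) =====
-- UP = "up"
--
-- RIGHT = "right"
--
-- LEFT = "left"
--
-- DOWN = "down"
--
-- def get_coords_table(coords):
--     coords_table = {}
--     for coord1 in coords:
--         coord1_directions = {UP: [], RIGHT: [], DOWN: [], LEFT: []}
--         for coord2 in coords:
--             coord2_direction = get_coord_direction(coord1, coord2)
--             if coord2_direction in coord1_directions:
--                 coord1_directions[coord2_direction].append(coord2)
--         coord1_string = coord_to_string(coord1)
--         coords_table[coord1_string] = coord1_directions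
--     return coords_table
--
-- def get_coord_direction(coord1, coord2):
--     x1, y1 = coord1
--     x2, y2 = coord2
--     if y2 == y1:
--         if x2 > x1:
--             return RIGHT
--         elif x2 < x1:
--             return LEFT
--     elif x2 == x1:
--         if y2 > y1:
--             return UP
--         elif y2 < y1:
--             return DOWN
--     return ""
--
-- def coord_to_string(coord):
--     x, y = coord
--     return f"{x}-{y}"
-- ===== SOURCE B (Python) =====
-- def get_coords_table(coords):
--     rows = {}
--     cols = {}
--     for c in coords:
--         rows.setdefault(c[1], []).append(c)
--         cols.setdefault(c[0], []).append(c)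
--     table = {}
--     for c in coords:
--         x, y = c
--         row = rows[y]
--         col = cols[x]
--         table[f"{x}-{y}"] = {
--             "up": [p for p in col if p[1] > y],
--             "right": [p for p in row if p[0] > x],
--             "down": [p for p in col if p[1] < y],
--             "left": [p for p in row if p[0] < x],
--         }
--     return table
-- ===== Notes on version B (the rewrite author's own statement) =====
-- stated objective: faster
-- what changed: Replaces the O(n^2) all-pairs inner scan with one pass that buckets coords by row (y) and by column (x), then builds each coord's four direction lists by filtering only its own row and column buckets.
import Mathlib
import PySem

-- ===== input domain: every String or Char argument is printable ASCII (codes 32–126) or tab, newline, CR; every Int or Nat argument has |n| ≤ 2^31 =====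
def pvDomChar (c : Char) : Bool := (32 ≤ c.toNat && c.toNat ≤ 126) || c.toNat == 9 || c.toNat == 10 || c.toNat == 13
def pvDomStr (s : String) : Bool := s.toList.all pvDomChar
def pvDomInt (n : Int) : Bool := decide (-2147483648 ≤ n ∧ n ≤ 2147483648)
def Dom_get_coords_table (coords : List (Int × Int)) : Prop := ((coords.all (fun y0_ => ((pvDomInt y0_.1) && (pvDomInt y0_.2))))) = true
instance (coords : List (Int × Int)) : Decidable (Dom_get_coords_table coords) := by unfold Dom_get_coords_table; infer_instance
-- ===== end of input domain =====

-- B buckets coords by row and column once, then filters only each coord's own buckets; faster (asymptotic) than A's all-pairs scan.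

-- ===== PORT A =====
def pvDirection (coord1 coord2 : Int × Int) : String :=
  if coord2.2 == coord1.2 then
    if coord2.1 > coord1.1 then "right"
    else if coord2.1 < coord1.1 then "left"
    else ""
  else if coord2.1 == coord1.1 then
    if coord2.2 > coord1.2 then "up"
    else if coord2.2 < coord1.2 then "down"
    else ""
  else ""

def pvCoordToString (c : Int × Int) : String :=
  PySem.Int.toStr c.1 ++ "-" ++ PySem.Int.toStr c.2

def pvInnerA (coords : List (Int × Int)) (c1 : Int × Int) :
    PySem.Dict String (List (Int × Int)) :=
  coords.foldl (fun d c2 =>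
      let dir := pvDirection c1 c2
      if d.contains dir then d.modify dir [] (· ++ [c2]) else d)
    (PySem.Dict.ofList [("up", []), ("right", []), ("down", []), ("left", [])])

def get_coords_table (coords : List (Int × Int)) :
    List (String × List (String × List (Int × Int))) :=
  (coords.foldl (fun t c1 => t.insert (pvCoordToString c1) (pvInnerA coords c1).items)
    PySem.Dict.empty).items

-- ===== PORT B =====
def get_coords_table_alt (coords : List (Int × Int)) :
    List (String × List (String × List (Int × Int))) :=
  let rows := coords.foldl (fun d c => d.modify c.2 [] (· ++ [c]))
      (PySem.Dict.empty : PySem.Dict Int (List (Int × Int)))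
  let cols := coords.foldl (fun d c => d.modify c.1 [] (· ++ [c]))
      (PySem.Dict.empty : PySem.Dict Int (List (Int × Int)))
  (coords.foldl (fun t c =>
      let row := rows.getD c.2 []
      let col := cols.getD c.1 []
      t.insert (pvCoordToString c)
        [("up", col.filter (fun p => decide (p.2 > c.2))),
         ("right", row.filter (fun p => decide (p.1 > c.1))),
         ("down", col.filter (fun p => decide (p.2 < c.2))),
         ("left", row.filter (fun p => decide (p.1 < c.1)))])
    PySem.Dict.empty).items

-- ===== PRECONDITION & SPEC =====
def Spec_get_coords_table (coords : List (Int × Int)) (out : List (String × List (String × List (Int × Int)))) : Prop := out = get_coords_table_alt coords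
instance (coords : List (Int × Int)) (out : List (String × List (String × List (Int × Int)))) : Decidable (Spec_get_coords_table coords out) := by unfold Spec_get_coords_table; infer_instance

-- ===== CLAIM (what is proved, stated in full; the proofs are below) =====
def Claim_equal_get_coords_table : Prop := ∀ (coords : List (Int × Int)), Dom_get_coords_table coords → Spec_get_coords_table coords (get_coords_table coords)

-- ===== LEMMAS AND PROOFS =====

-- the grouping fold's bucket at key k is the filter of the input
theorem pv_group_getD (key : Int × Int → Int) (l : List (Int × Int))
    (d : PySem.Dict Int (List (Int × Int))) (k : Int) :
    (l.foldl (fun d c => d.modify (key c) [] (· ++ [c])) d).getD k []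
      = d.getD k [] ++ l.filter (fun c => key c == k) := by
  induction l generalizing d with
  | nil => simp
  | cons c l ih =>
    simp only [List.foldl_cons, List.filter_cons, ih]
    rw [PySem.Dict.getD_modify]
    by_cases h : key c = k
    · simp [h, List.append_assoc]
    · simp [h, Ne.symm h]

-- A's inner loop, with the four direction lists generalized
theorem pv_innerA_eq (c1 : Int × Int) (l : List (Int × Int))
    (u r dn lf : List (Int × Int)) :
    (l.foldl (fun d c2 =>
        let dir := pvDirection c1 c2
        if d.contains dir then d.modify dir [] (· ++ [c2]) else d)
      (PySem.Dict.mk [("up", u), ("right", r), ("down", dn), ("left", lf)]))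
    = PySem.Dict.mk
        [("up", u ++ l.filter (fun c => c.1 == c1.1 && decide (c.2 > c1.2))),
         ("right", r ++ l.filter (fun c => c.2 == c1.2 && decide (c.1 > c1.1))),
         ("down", dn ++ l.filter (fun c => c.1 == c1.1 && decide (c.2 < c1.2))),
         ("left", lf ++ l.filter (fun c => c.2 == c1.2 && decide (c.1 < c1.1)))] := by
  induction l generalizing u r dn lf with
  | nil => simp
  | cons c l ih =>
    simp only [List.foldl_cons, List.filter_cons]
    by_cases hy : c.2 = c1.2
    · by_cases hxg : c.1 > c1.1
      · have hdir : pvDirection c1 c = "right" := by simp [pvDirection, hy, hxg]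
        simp only [hdir]
        refine .trans (ih u (r ++ [c]) dn lf) ?_
        simp [hy, hxg, not_lt.mpr (le_of_lt hxg), List.append_assoc]
      · by_cases hxl : c.1 < c1.1
        · have hdir : pvDirection c1 c = "left" := by
            simp [pvDirection, hy, hxl, not_lt.mpr (le_of_lt hxl)]
          simp only [hdir]
          refine .trans (ih u r dn (lf ++ [c])) ?_
          simp [hy, hxl, not_lt.mpr (le_of_lt hxl), List.append_assoc]
        · have hx : c.1 = c1.1 := le_antisymm (not_lt.mp hxg) (not_lt.mp hxl)
          have hdir : pvDirection c1 c = "" := by simp [pvDirection, hy, hxg, hxl]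
          simp only [hdir]
          refine .trans (ih u r dn lf) ?_
          simp [hy, hx]
    · by_cases hx : c.1 = c1.1
      · by_cases hyg : c.2 > c1.2
        · have hdir : pvDirection c1 c = "up" := by simp [pvDirection, hy, hx, hyg]
          simp only [hdir]
          refine .trans (ih (u ++ [c]) r dn lf) ?_
          simp [hx, hyg, not_lt.mpr (le_of_lt hyg), List.append_assoc]
        · have hyl : c.2 < c1.2 := lt_of_le_of_ne (not_lt.mp hyg) hy
          have hdir : pvDirection c1 c = "down" := by
            simp [pvDirection, hy, hx, hyg, hyl]
          simp only [hdir]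
          refine .trans (ih u r (dn ++ [c]) lf) ?_
          simp [hx, hyl, hyg, List.append_assoc]
      · have hdir : pvDirection c1 c = "" := by simp [pvDirection, hy, hx]
        simp only [hdir]
        refine .trans (ih u r dn lf) ?_
        simp [hy, hx]

theorem pv_entry_eq (coords : List (Int × Int)) (c1 : Int × Int) :
    (pvInnerA coords c1).items =
      [("up", ((coords.foldl (fun d c => d.modify c.1 [] (· ++ [c])) PySem.Dict.empty).getD c1.1 []).filter (fun p => decide (p.2 > c1.2))),
       ("right", ((coords.foldl (fun d c => d.modify c.2 [] (· ++ [c])) PySem.Dict.empty).getD c1.2 []).filter (fun p => decide (p.1 > c1.1))),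
       ("down", ((coords.foldl (fun d c => d.modify c.1 [] (· ++ [c])) PySem.Dict.empty).getD c1.1 []).filter (fun p => decide (p.2 < c1.2))),
       ("left", ((coords.foldl (fun d c => d.modify c.2 [] (· ++ [c])) PySem.Dict.empty).getD c1.2 []).filter (fun p => decide (p.1 < c1.1)))] := by
  have hofl : (PySem.Dict.ofList [("up", ([] : List (Int × Int))), ("right", []), ("down", []), ("left", [])])
      = PySem.Dict.mk [("up", []), ("right", []), ("down", []), ("left", [])] := by decide
  rw [show (coords.foldl (fun d c => d.modify c.1 [] (· ++ [c])) PySem.Dict.empty)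
      = (coords.foldl (fun d c => d.modify ((fun c : Int × Int => c.1) c) [] (· ++ [c])) PySem.Dict.empty) from rfl,
    pv_group_getD (fun c : Int × Int => c.1),
    show (coords.foldl (fun d c => d.modify c.2 [] (· ++ [c])) PySem.Dict.empty)
      = (coords.foldl (fun d c => d.modify ((fun c : Int × Int => c.2) c) [] (· ++ [c])) PySem.Dict.empty) from rfl,
    pv_group_getD (fun c : Int × Int => c.2)]
  unfold pvInnerA
  rw [hofl, pv_innerA_eq]
  simp only [PySem.Dict.getD_empty, List.nil_append, List.filter_filter]
  congr 1 <;> [skip; congr 1] <;> [skip; skip; congr 1] <;>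
    simp [Bool.and_comm]

-- ===== VERDICT (by name: the statement is the Claim_ definition above) =====
theorem get_coords_table_spec : Claim_equal_get_coords_table := by
  intro coords _
  unfold Spec_get_coords_table get_coords_table get_coords_table_alt
  congr 1
  apply PySem.List.foldl_congr_mem
  intro t c1 _
  rw [pv_entry_eq]
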